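-- pv_equiv track=rewrite | github.com/piegeek/AlgorithmsPractice | Practice/COS_Pro_1급_Python/1급 Python_정답/Python 1급 정답_06.py | solution
-- ===== SOURCE A (Python) =====
-- def solution(start, locations):
--     answer = 0
--     min = 100 #here
--     max = 0
--     for i in locations:
--         if i < min:
--             min = i
--         if i > max:
--             max = i
--
--     if start <= min:
--         answer = max - start
--     elif start >= max:
--         answer = start - min
--     else:
--         if start - min < max - start:
--             answer = start - min + (max - min)
--         else:
--             answer = max - start + (max - min)
--
--     return answer
-- ===== SOURCE B (Python) =====
-- def solution(start, locations):
--     stops = sorted(locations)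
--     lo, hi = stops[0], stops[-1]
--     left_first = abs(start - lo) + (hi - lo)
--     right_first = abs(start - hi) + (hi - lo)
--     return min(left_first, right_first)
-- ===== Notes on version B (the rewrite author's own statement) =====
-- stated objective: alternative
-- what changed: B sorts the stops, takes the two route ends from the sorted list, and returns the cheaper of the two sweep orders (left end first vs right end first), replacing A's sentinel-initialized min/max tracking loop and three-way branch; Pre_ excludes the empty list, on which B's stops[0] raises IndexError while A returns a sentinel artifact.
-- intended difference: On nonempty lists lying entirely above 100 with start > 100, or entirely below 0 with start < 0, A's extremes are stuck at its initializers min=100/max=0 so it measures travel to a phantom point (e.g. A(150,[200]) = 150); B uses the actual nearest/farthest stops (B(150,[200]) = 50), the intended travel distance. — e.g. on solution(150, [200]): A returns 150, B returns 50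
-- outside the precondition, e.g. on solution(5, []): A returns -5, B raises IndexError
import Mathlib
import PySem

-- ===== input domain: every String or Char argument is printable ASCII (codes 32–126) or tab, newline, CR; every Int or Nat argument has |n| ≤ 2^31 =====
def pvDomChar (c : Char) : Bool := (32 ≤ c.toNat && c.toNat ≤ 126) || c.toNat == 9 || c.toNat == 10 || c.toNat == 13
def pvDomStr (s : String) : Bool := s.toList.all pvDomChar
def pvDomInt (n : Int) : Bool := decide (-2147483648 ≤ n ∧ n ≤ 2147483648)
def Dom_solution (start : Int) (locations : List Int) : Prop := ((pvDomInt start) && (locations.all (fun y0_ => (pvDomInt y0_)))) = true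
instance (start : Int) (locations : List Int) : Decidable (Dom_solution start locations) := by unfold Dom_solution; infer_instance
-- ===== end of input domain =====

-- B sorts the stops, reads the route ends off the sorted list and returns the cheaper of the two sweep orders; on lists entirely above 100 (start > 100) or entirely below 0 (start < 0) A's sentinel-initialized extremes give an inflated answer (see D_), and on the empty list B raises where A returns a sentinel artifact (excluded by Pre_).

-- ===== PORT A =====
def solution (start : Int) (locations : List Int) : Int :=
  let st := locations.foldl (fun (p : Int × Int) i =>
    let mn := if i < p.1 then i else p.1
    let mx := if i > p.2 then i else p.2
    (mn, mx)) (100, 0)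
  let mn := st.1
  let mx := st.2
  if start ≤ mn then mx - start
  else if start ≥ mx then start - mn
  else if start - mn < mx - start then start - mn + (mx - mn)
  else mx - start + (mx - mn)

-- ===== PORT B =====
def solution_alt (start : Int) (locations : List Int) : Int :=
  let stops := PySem.List.sorted locations (fun y => y) false
  let lo := (PySem.List.pyGet? stops 0).getD 0
  let hi := (PySem.List.pyGet? stops (-1)).getD 0
  let leftFirst := |start - lo| + (hi - lo)
  let rightFirst := |start - hi| + (hi - lo)
  min leftFirst rightFirst

-- ===== PRECONDITION & SPEC =====
-- Pre_ excludes only the empty list, on which B's stops[0] raises IndexError while A returns the sentinel artifact -start (or start-100).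
def Pre_solution (start : Int) (locations : List Int) : Prop := locations ≠ []
instance (start : Int) (locations : List Int) : Decidable (Pre_solution start locations) := by unfold Pre_solution; infer_instance
def pvWitness_solution : Int × List Int := (30, [10, 80, 50])
-- On nonempty lists entirely above 100 with start > 100, or entirely below 0 with start < 0, A's extremes are stuck at its initializers min=100/max=0 so it measures travel to a phantom point (A(150,[200]) = 150); B uses the actual stops (B(150,[200]) = 50), the intended travel distance.
def D_solution (start : Int) (locations : List Int) : Prop :=
  locations ≠ [] ∧ (((∀ x ∈ locations, 100 < x) ∧ 100 < start) ∨ ((∀ x ∈ locations, x < 0) ∧ start < 0))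
instance (start : Int) (locations : List Int) : Decidable (D_solution start locations) := by unfold D_solution; infer_instance
def Spec_solution (start : Int) (locations : List Int) (out : Int) : Prop := ¬ D_solution start locations → out = solution_alt start locations
instance (start : Int) (locations : List Int) (out : Int) : Decidable (Spec_solution start locations out) := by unfold Spec_solution; infer_instance
def pvDiffWitness_solution : Int × List Int := (150, [200])
def pvDiffWitnessOut_solution : Int × Int := (150, 50)

-- ===== CLAIM (what is proved, stated in full; the proofs are below) =====
def Claim_unchanged_solution : Prop := ∀ (start : Int) (locations : List Int), Dom_solution start locations → Pre_solution start locations → Spec_solution start locations (solution start locations)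
def Claim_changed_solution : Prop := Dom_solution (pvDiffWitness_solution.1) (pvDiffWitness_solution.2) ∧ Pre_solution (pvDiffWitness_solution.1) (pvDiffWitness_solution.2) ∧ D_solution (pvDiffWitness_solution.1) (pvDiffWitness_solution.2) ∧ solution (pvDiffWitness_solution.1) (pvDiffWitness_solution.2) = pvDiffWitnessOut_solution.1 ∧ solution_alt (pvDiffWitness_solution.1) (pvDiffWitness_solution.2) = pvDiffWitnessOut_solution.2 ∧ pvDiffWitnessOut_solution.1 ≠ pvDiffWitnessOut_solution.2
def Claim_exact_solution : Prop := ∀ (start : Int) (locations : List Int), Dom_solution start locations → Pre_solution start locations → D_solution start locations → solution start locations ≠ solution_alt start locations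

-- ===== LEMMAS AND PROOFS =====

-- A's fold computes the running min and max of the list starting from the sentinels.
theorem foldA_minmax (l : List Int) (a b : Int) :
    l.foldl (fun (p : Int × Int) i =>
      let mn := if i < p.1 then i else p.1
      let mx := if i > p.2 then i else p.2
      (mn, mx)) (a, b) = (l.foldl min a, l.foldl max b) := by
  induction l generalizing a b with
  | nil => rfl
  | cons x t ih =>
      simp only [List.foldl_cons]
      rw [ih]
      congr 1 <;>
        · congr 1
          simp [min_def, max_def]
          omega

theorem foldl_min_of_le (l : List Int) (a : Int) (h : ∀ y ∈ l, a ≤ y) : l.foldl min a = a := by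
  induction l with
  | nil => rfl
  | cons x t ih =>
      simp only [List.foldl_cons]
      rw [min_eq_left (h x (by simp))]
      exact ih fun y hy => h y (by simp [hy])

theorem foldl_max_of_ge (l : List Int) (a : Int) (h : ∀ y ∈ l, y ≤ a) : l.foldl max a = a := by
  induction l with
  | nil => rfl
  | cons x t ih =>
      simp only [List.foldl_cons]
      rw [max_eq_left (h x (by simp))]
      exact ih fun y hy => h y (by simp [hy])

theorem foldl_min_eq_of_isMin (l : List Int) (a lo : Int)
    (hmem : lo ∈ l) (hle : ∀ y ∈ l, lo ≤ y) : l.foldl min a = min a lo := by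
  induction l generalizing a with
  | nil => simp at hmem
  | cons x t ih =>
      simp only [List.foldl_cons]
      by_cases hm : lo ∈ t
      · rw [ih (min a x) hm (fun y hy => hle y (by simp [hy]))]
        have hx : lo ≤ x := hle x (by simp)
        simp [min_def]; omega
      · have hx : lo = x := by
          rcases List.mem_cons.mp hmem with h | h
          · exact h
          · exact absurd h hm
        subst hx
        exact foldl_min_of_le t (min a lo)
          (fun y hy => le_trans (min_le_right a lo) (hle y (by simp [hy])))

theorem foldl_max_eq_of_isMax (l : List Int) (a hi : Int)
    (hmem : hi ∈ l) (hge : ∀ y ∈ l, y ≤ hi) : l.foldl max a = max a hi := by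
  induction l generalizing a with
  | nil => simp at hmem
  | cons x t ih =>
      simp only [List.foldl_cons]
      by_cases hm : hi ∈ t
      · rw [ih (max a x) hm (fun y hy => hge y (by simp [hy]))]
        have hx : x ≤ hi := hge x (by simp)
        simp [max_def]; omega
      · have hx : hi = x := by
          rcases List.mem_cons.mp hmem with h | h
          · exact h
          · exact absurd h hm
        subst hx
        exact foldl_max_of_ge t (max a hi)
          (fun y hy => le_trans (hge y (by simp [hy])) (le_max_right a hi))

-- In a (≤)-pairwise list every element is bounded by the last element.
theorem getLastD_isMax (l : List Int) (hpw : l.Pairwise (fun a b : Int => a ≤ b)) :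
    ∀ y ∈ l, y ≤ l.getLast?.getD 0 := by
  induction l with
  | nil => simp
  | cons x t ih =>
      cases t with
      | nil => simp
      | cons z w =>
          intro y hy
          have hpw' := (List.pairwise_cons.mp hpw).2
          have hlast : (x :: z :: w).getLast?.getD 0 = (z :: w).getLast?.getD 0 := by
            simp [List.getLast?_cons_cons]
          rw [hlast]
          rcases List.mem_cons.mp hy with h | h
          · subst h
            exact le_trans ((List.pairwise_cons.mp hpw).1 z (by simp))
              (ih hpw' z (by simp))
          · exact ih hpw' y h

theorem getLastD_mem (l : List Int) (h : l ≠ []) : l.getLast?.getD 0 ∈ l := by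
  rw [List.getLast?_eq_some_getLast h]
  exact List.getLast_mem h

-- For nonempty locations, B's lo/hi are a member that is a lower (resp. upper) bound.
theorem sorted_ends (l : List Int) (h : l ≠ []) :
    ∃ lo hi : Int,
      (PySem.List.pyGet? (PySem.List.sorted l (fun y => y) false) 0).getD 0 = lo ∧
      (PySem.List.pyGet? (PySem.List.sorted l (fun y => y) false) (-1)).getD 0 = hi ∧
      lo ∈ l ∧ hi ∈ l ∧ (∀ y ∈ l, lo ≤ y) ∧ (∀ y ∈ l, y ≤ hi) := by
  have hperm : (PySem.List.sorted l (fun y => y) false).Perm l := PySem.List.sorted_perm l _ _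
  have hpw : (PySem.List.sorted l (fun y => y) false).Pairwise (fun a b : Int => a ≤ b) := by
    simpa using PySem.List.sorted_pairwise l (fun y => y)
  have hne : PySem.List.sorted l (fun y => y) false ≠ [] :=
    fun hnil => h (List.Perm.eq_nil (hnil ▸ hperm.symm))
  obtain ⟨m, t, hmt⟩ := List.exists_cons_of_ne_nil hne
  refine ⟨m, (PySem.List.sorted l (fun y => y) false).getLast?.getD 0, ?_, ?_, ?_, ?_, ?_, ?_⟩
  · rw [hmt, PySem.List.pyGet?_zero_cons]; rfl
  · rw [PySem.List.pyGet?_neg_one]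
  · exact hperm.mem_iff.mp (by rw [hmt]; simp)
  · exact hperm.mem_iff.mp (getLastD_mem _ hne)
  · exact fun y hy => PySem.List.key_head_sorted_le l (fun y => y) hmt y hy
  · exact fun y hy => getLastD_isMax _ hpw y (hperm.mem_iff.mpr hy)

theorem solution_eq_cases (start : Int) (l : List Int) (h : l ≠ []) :
    ∃ lo hi : Int, lo ∈ l ∧ hi ∈ l ∧ (∀ y ∈ l, lo ≤ y) ∧ (∀ y ∈ l, y ≤ hi) ∧
      solution start l = (
        let mn := min 100 lo
        let mx := max 0 hi
        if start ≤ mn then mx - start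
        else if start ≥ mx then start - mn
        else if start - mn < mx - start then start - mn + (mx - mn)
        else mx - start + (mx - mn)) ∧
      solution_alt start l = min (|start - lo| + (hi - lo)) (|start - hi| + (hi - lo)) := by
  obtain ⟨lo, hi, hlo, hhi, hlmem, hhmem, hlle, hhge⟩ := sorted_ends l h
  refine ⟨lo, hi, hlmem, hhmem, hlle, hhge, ?_, ?_⟩
  · simp only [solution]
    rw [foldA_minmax, foldl_min_eq_of_isMin l 100 lo hlmem hlle,
        foldl_max_eq_of_isMax l 0 hi hhmem hhge]
  · simp only [solution_alt]
    rw [hlo, hhi]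

theorem solution_spec : Claim_unchanged_solution := by
  intro start l _ hpre hD
  unfold Pre_solution at hpre
  unfold D_solution at hD
  obtain ⟨lo, hi, hlmem, hhmem, hlle, hhge, hA, hB⟩ := solution_eq_cases start l hpre
  show solution start l = solution_alt start l
  rw [hA, hB]
  have hlohi : lo ≤ hi := hhge lo hlmem
  have hc1 : ¬(100 < lo ∧ 100 < start) := by
    intro hx
    exact hD ⟨hpre, Or.inl ⟨fun x hx2 => lt_of_lt_of_le hx.1 (hlle x hx2), hx.2⟩⟩
  have hc2 : ¬(hi < 0 ∧ start < 0) := by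
    intro hx
    exact hD ⟨hpre, Or.inr ⟨fun x hx2 => lt_of_le_of_lt (hhge x hx2) hx.1, hx.2⟩⟩
  rcases abs_cases (start - lo) with ⟨e1, f1⟩ | ⟨e1, f1⟩ <;>
    rcases abs_cases (start - hi) with ⟨e2, f2⟩ | ⟨e2, f2⟩ <;>
      rw [e1, e2] <;> simp only [min_def, max_def] <;> split_ifs <;> omega

theorem solution_tight : Claim_exact_solution := by
  intro start l _ hpre hD
  unfold Pre_solution at hpre
  unfold D_solution at hD
  obtain ⟨lo, hi, hlmem, hhmem, hlle, hhge, hA, hB⟩ := solution_eq_cases start l hpre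
  rw [hA, hB]
  have hlohi : lo ≤ hi := hhge lo hlmem
  rcases hD.2 with ⟨hall, hs⟩ | ⟨hall, hs⟩
  · have hlo : 100 < lo := hall lo hlmem
    have hhi2 : 100 < hi := hall hi hhmem
    rcases abs_cases (start - lo) with ⟨e1, f1⟩ | ⟨e1, f1⟩ <;>
      rcases abs_cases (start - hi) with ⟨e2, f2⟩ | ⟨e2, f2⟩ <;>
        rw [e1, e2] <;> simp only [min_def, max_def] <;> split_ifs <;> omega
  · have hlo : lo < 0 := hall lo hlmem
    have hhi2 : hi < 0 := hall hi hhmem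
    rcases abs_cases (start - lo) with ⟨e1, f1⟩ | ⟨e1, f1⟩ <;>
      rcases abs_cases (start - hi) with ⟨e2, f2⟩ | ⟨e2, f2⟩ <;>
        rw [e1, e2] <;> simp only [min_def, max_def] <;> split_ifs <;> omega

-- ===== VERDICT (by name: the statement is the Claim_ definition above) =====
theorem solution_changed : Claim_changed_solution := by unfold Claim_changed_solution; decide
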